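-- pv_equiv track=rewrite | github.com/bgrevelt/Advent-of-code-2022 | day2/day2.py | codes_to_moves_new
-- ===== SOURCE A (Python) =====
-- def code_to_move(code):
--     r = {
--     'A':'rock',
--     'B':'paper',
--     'C':'scissors',
--     'X':'rock',
--     'Y':'paper',
--     'Z':'scissors'
--     }
--     return r[code]
--
-- def codes_to_moves_new(theirs, mine):
--     winners = {
--         'rock' : 'paper',
--         'paper': 'scissors',
--         'scissors': 'rock'
--     }
--     losers = {v:k for k,v in winners.items()}
--
--     their_move = code_to_move(theirs)
--
--     if mine == 'X': #We want to lose
--         return their_move, losers[their_move]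
--     elif mine == 'Y': #We want to tie
--         return their_move, their_move
--     else: #We want to win
--         return their_move, winners[their_move]
-- ===== SOURCE B (Python) =====
-- def codes_to_moves_new(theirs, mine):
--     moves = ['rock', 'paper', 'scissors']
--     their_move = moves['ABCXYZ'.index(theirs) % 3]
--
--     def beats(a, b):
--         return (a, b) in (('rock', 'scissors'), ('paper', 'rock'), ('scissors', 'paper'))
--
--     for m in moves:
--         if mine == 'X':
--             ok = beats(their_move, m)   # we lose: their move beats ours
--         elif mine == 'Y':
--             ok = (m == their_move)      # tie
--         else:
--             ok = beats(m, their_move)   # we win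
--         if ok:
--             return their_move, m
-- ===== Notes on version B (the rewrite author's own statement) =====
-- stated objective: alternative
-- what changed: Instead of winner/loser lookup tables, B decodes theirs by scanning 'ABCXYZ' for its position and then SEARCHES the three candidate moves for the first one satisfying a beats/tie predicate against their move.
import Mathlib
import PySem

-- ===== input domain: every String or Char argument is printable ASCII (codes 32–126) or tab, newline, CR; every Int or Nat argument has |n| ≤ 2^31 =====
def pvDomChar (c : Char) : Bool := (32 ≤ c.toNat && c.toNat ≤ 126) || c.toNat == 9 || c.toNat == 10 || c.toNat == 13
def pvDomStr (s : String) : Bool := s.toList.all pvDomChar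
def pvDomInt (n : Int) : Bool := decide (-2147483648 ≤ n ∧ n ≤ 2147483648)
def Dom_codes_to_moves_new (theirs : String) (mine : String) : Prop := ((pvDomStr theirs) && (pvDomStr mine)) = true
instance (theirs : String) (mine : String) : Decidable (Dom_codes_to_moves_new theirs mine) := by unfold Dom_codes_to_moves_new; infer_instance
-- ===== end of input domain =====

-- B replaces A's winners/losers dicts and cascade with a search: decode theirs by scanning
-- "ABCXYZ", then pick the first of the three moves satisfying a beats/tie predicate.


-- ===== PORT A =====
-- dict r of code_to_move, built in insertion order
def pvR : PySem.Dict String String :=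
  ((((((PySem.Dict.empty.insert "A" "rock").insert "B" "paper").insert "C" "scissors").insert
      "X" "rock").insert "Y" "paper").insert "Z" "scissors")

-- r[code]; the KeyError case (key absent) is excluded by Pre_, the default "" is unreachable there
def code_to_move (code : String) : String := (pvR.get? code).getD ""

def pvWinners : PySem.Dict String String :=
  (((PySem.Dict.empty.insert "rock" "paper").insert "paper" "scissors").insert "scissors" "rock")

-- losers = {v:k for k,v in winners.items()}
def pvLosers : PySem.Dict String String :=
  pvWinners.items.foldl (fun d kv => d.insert kv.2 kv.1) PySem.Dict.empty

def codes_to_moves_new (theirs : String) (mine : String) : String × String :=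
  let their_move := code_to_move theirs
  if mine == "X" then (their_move, (pvLosers.get? their_move).getD "")
  else if mine == "Y" then (their_move, their_move)
  else (their_move, (pvWinners.get? their_move).getD "")

-- ===== PORT B =====
-- beats(a, b): tuple-membership test, as in Source B
def pvBeats (a b : String) : Bool :=
  [("rock", "scissors"), ("paper", "rock"), ("scissors", "paper")].contains (a, b)

-- 'ABCXYZ'.index(theirs) raises ValueError when absent (excluded by Pre_); find = index there.
-- The implicit 'return None' when the loop finds nothing is unreachable under Pre_; default "".
def codes_to_moves_new_alt (theirs : String) (mine : String) : String × String :=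
  let moves := ["rock", "paper", "scissors"]
  let their_move := PySem.List.pyGetD moves (PySem.Int.mod (PySem.Str.find "ABCXYZ" theirs) 3) ""
  match moves.find? (fun m =>
      if mine == "X" then pvBeats their_move m
      else if mine == "Y" then m == their_move
      else pvBeats m their_move) with
  | some m => (their_move, m)
  | none => (their_move, "")

-- ===== PRECONDITION & SPEC =====
-- Pre_ excludes exactly the inputs where A raises KeyError: theirs outside the six codes.
def Pre_codes_to_moves_new (theirs : String) (mine : String) : Prop :=
  theirs ∈ ["A", "B", "C", "X", "Y", "Z"]
instance (theirs : String) (mine : String) : Decidable (Pre_codes_to_moves_new theirs mine) := by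
  unfold Pre_codes_to_moves_new; infer_instance

def pvWitness_codes_to_moves_new : String × String := ("A", "Y")

def Spec_codes_to_moves_new (theirs : String) (mine : String) (out : String × String) : Prop := out = codes_to_moves_new_alt theirs mine
instance (theirs : String) (mine : String) (out : String × String) : Decidable (Spec_codes_to_moves_new theirs mine out) := by unfold Spec_codes_to_moves_new; infer_instance

-- ===== CLAIM (what is proved, stated in full; the proofs are below) =====
def Claim_equal_codes_to_moves_new : Prop := ∀ (theirs : String) (mine : String), Dom_codes_to_moves_new theirs mine → Pre_codes_to_moves_new theirs mine → Spec_codes_to_moves_new theirs mine (codes_to_moves_new theirs mine)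

-- ===== LEMMAS AND PROOFS =====
-- With theirs fixed (six cases from Pre_), both sides depend on mine only through the
-- tests mine = "X" and mine = "Y", so three by_cases close each of the six cases.
theorem codes_to_moves_new_case (theirs : String)
    (h : theirs ∈ ["A", "B", "C", "X", "Y", "Z"]) (mine : String) :
    codes_to_moves_new theirs mine = codes_to_moves_new_alt theirs mine := by
  by_cases hx : mine = "X"
  · subst hx; fin_cases h <;> decide
  · by_cases hy : mine = "Y"
    · subst hy; fin_cases h <;> decide
    · have hx' : (mine == "X") = false := by simp [hx]
      have hy' : (mine == "Y") = false := by simp [hy]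
      fin_cases h <;>
        simp only [codes_to_moves_new, codes_to_moves_new_alt, code_to_move, hx', hy',
                   Bool.false_eq_true, if_false] <;> decide

-- ===== VERDICT (by name: the statement is the Claim_ definition above) =====
theorem codes_to_moves_new_spec : Claim_equal_codes_to_moves_new := by
  intro theirs mine _ hpre
  exact codes_to_moves_new_case theirs hpre mine
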